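-- pv_equiv track=rewrite | github.com/greenisagoodcolor/FreeAgentics | services/gmn_generator.py | _validate_gmn_structure
-- ===== SOURCE A (Python) =====
-- from typing import Any, Dict, List, Optional, Tuple
--
-- def _validate_gmn_structure(gmn_spec: str) -> List[str]:
--     """Perform basic structural validation of GMN.
--
--     Args:
--         gmn_spec: GMN specification to validate
--
--     Returns:
--         List of structural errors (empty if valid)
--     """
--     errors = []
--     lines = gmn_spec.strip().split("\n")
--
--     # Track node definitions
--     defined_nodes = set()
--     referenced_nodes = set()
--     node_types = {}
--
--     # Parse GMN line by line
--     current_node = None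
--     brace_count = 0
--
--     for i, line in enumerate(lines):
--         line = line.strip()
--
--         # Track braces
--         brace_count += line.count("{") - line.count("}")
--
--         # Check for node definition
--         if line.startswith("node"):
--             parts = line.split()
--             if len(parts) >= 3:
--                 node_type = parts[1]
--                 node_name = parts[2].rstrip("{")
--                 defined_nodes.add(node_name)
--                 node_types[node_name] = node_type
--                 current_node = node_name
--             else:
--                 errors.append(f"Line {i + 1}: Invalid node definition")
--
--         # Check for node references in properties
--         if current_node and ":" in line:
--             if "from:" in line or "to:" in line or "state:" in line:
--                 # Extract referenced nodes
--                 value_part = line.split(":", 1)[1].strip()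
--                 # Handle both single references and lists
--                 if value_part.startswith("["):
--                     # List of nodes
--                     node_refs = value_part.strip("[]").split(",")
--                     for ref in node_refs:
--                         ref = ref.strip()
--                         if ref and not ref.isdigit():
--                             referenced_nodes.add(ref)
--                 else:
--                     # Single node reference
--                     ref = value_part.strip()
--                     if ref and not ref.isdigit() and ref != "true" and ref != "false":
--                         referenced_nodes.add(ref)
--
--     # Check for unbalanced braces
--     if brace_count != 0:
--         errors.append(f"Unbalanced braces: {brace_count} unclosed")
--
--     # Check for undefined references
--     undefined_refs = referenced_nodes - defined_nodes
--     if undefined_refs: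
--         errors.append(f"Undefined node references: {', '.join(sorted(undefined_refs))}")
--
--     # Check for required node types
--     required_types = {"state", "action"}
--     found_types = set(node_types.values())
--     missing_types = required_types - found_types
--     if missing_types:
--         errors.append(f"Missing required node types: {', '.join(sorted(missing_types))}")
--
--     # Check for transitions or emissions
--     if "transition" not in found_types and "emission" not in found_types:
--         errors.append("No transition or emission nodes defined")
--
--     return errors
-- ===== SOURCE B (Python) =====
-- from typing import Any, Dict, List, Optional, Tuple
--
--
-- def _parse_def(line):
--     """Return (type, name) if line is a valid node definition, else None."""
--     if line.startswith("node"):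
--         parts = line.split()
--         if len(parts) >= 3:
--             return (parts[1], parts[2].rstrip("{"))
--     return None
--
--
-- def _extract_refs(line):
--     """Candidate node references on a from:/to:/state: property line."""
--     value = line.split(":", 1)[1].strip()
--     if value.startswith("["):
--         items = [r.strip() for r in value.strip("[]").split(",")]
--         return [r for r in items if r and not r.isdigit()]
--     if value and not value.isdigit() and value != "true" and value != "false":
--         return [value]
--     return []
--
--
-- def _validate_gmn_structure(gmn_spec: str) -> List[str]:
--     lines = [raw.strip() for raw in gmn_spec.strip().split("\n")]
--     defs = [_parse_def(line) for line in lines]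
--
--     brace_count = sum(line.count("{") - line.count("}") for line in lines)
--
--     errors = [
--         "Line %d: Invalid node definition" % (i + 1)
--         for i, line in enumerate(lines)
--         if line.startswith("node") and defs[i] is None
--     ]
--
--     node_types = {name: node_type for d in defs if d is not None for node_type, name in [d]}
--
--     # gate[i]: whether the most recent valid definition up to line i has a non-empty name
--     gates = []
--     current = ""
--     for d in defs:
--         if d is not None:
--             current = d[1]
--         gates.append(bool(current))
--
--     referenced = []  # distinct, in first-occurrence order
--     seen = set()
--     for line, gate in zip(lines, gates):
--         if gate and ":" in line and ("from:" in line or "to:" in line or "state:" in line):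
--             for ref in _extract_refs(line):
--                 if ref not in seen:
--                     seen.add(ref)
--                     referenced.append(ref)
--
--     undefined = [r for r in referenced if r not in node_types]
--     found_types = set(node_types.values())
--     missing = [t for t in ("action", "state") if t not in found_types]
--
--     if brace_count != 0:
--         errors.append(f"Unbalanced braces: {brace_count} unclosed")
--     if undefined:
--         errors.append(f"Undefined node references: {', '.join(sorted(undefined))}")
--     if missing:
--         errors.append(f"Missing required node types: {', '.join(missing)}")
--     if "transition" not in found_types and "emission" not in found_types:
--         errors.append("No transition or emission nodes defined")
--     return errors
-- ===== Notes on version B (the rewrite author's own statement) =====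
-- stated objective: alternative
-- what changed: Replaces A's single imperative loop that threads six mutable variables with per-concern passes: each line is parsed once into a defs list, then the brace balance, the invalid-definition errors, the node-type dict, a gate scan for the current-node truthiness and the reference collection are each computed by their own comprehension/fold over that list.
import Mathlib
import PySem

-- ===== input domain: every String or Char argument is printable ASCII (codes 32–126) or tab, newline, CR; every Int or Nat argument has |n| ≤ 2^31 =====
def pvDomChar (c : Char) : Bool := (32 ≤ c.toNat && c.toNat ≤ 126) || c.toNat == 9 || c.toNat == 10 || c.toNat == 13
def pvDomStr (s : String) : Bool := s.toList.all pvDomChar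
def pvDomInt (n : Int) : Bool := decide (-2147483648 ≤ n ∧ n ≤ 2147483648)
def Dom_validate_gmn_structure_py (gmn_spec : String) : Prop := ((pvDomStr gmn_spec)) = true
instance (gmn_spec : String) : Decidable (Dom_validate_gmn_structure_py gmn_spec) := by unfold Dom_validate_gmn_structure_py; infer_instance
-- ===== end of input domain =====

set_option maxHeartbeats 1000000


-- B replaces A's single six-variable imperative loop by independent per-concern passes over a
-- once-parsed list of line definitions (objective: alternative decomposition, same cost).

-- hand port of Python's str.rstrip("{") (PySem has no rstrip-with-chars): drops trailing '{'
-- characters; exact for every string. Used by both ports (both Pythons call .rstrip("{")).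
def pvRstripBrace (s : String) : String :=
  String.ofList ((s.toList.reverse.dropWhile (fun c => c == '{')).reverse)

-- ===== PORT A =====

-- Python truthiness of current_node (None or a str): non-None and non-empty
def pvA_truthy (cur : Option String) : Bool :=
  match cur with
  | some s => !(s.toList.isEmpty)
  | none => false

-- the inner `for ref in node_refs` loop of A
def pvA_addList (refs : PySem.Set String) (items : List String) : PySem.Set String :=
  items.foldl
    (fun r s =>
      let ref := PySem.Str.strip s
      if !(ref.toList.isEmpty) && !(PySem.Str.strIsdigit ref) then PySem.Set.add r ref else r)
    refs

-- the node-reference block of A's loop body (uses the already-updated current_node)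
def pvA_refs (cur : Option String) (line : String) (referenced : PySem.Set String) : PySem.Set String :=
  if pvA_truthy cur && PySem.Str.isIn ":" line then
    if PySem.Str.isIn "from:" line || PySem.Str.isIn "to:" line || PySem.Str.isIn "state:" line then
      -- line.split(":", 1)[1]: [1] is in range since ":" occurs in line
      let value_part := PySem.Str.strip (((PySem.Str.splitMax? line ":" 1).getD []).getD 1 "")
      if PySem.Str.startswith value_part "[" then
        pvA_addList referenced
          ((PySem.Str.split? (PySem.Str.stripChars value_part "[]") ",").getD [])
      else
        let ref := PySem.Str.strip value_part
        if !(ref.toList.isEmpty) && !(PySem.Str.strIsdigit ref) && ref != "true" && ref != "false" then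
          PySem.Set.add referenced ref
        else referenced
    else referenced
  else referenced

-- the `for i, line in enumerate(lines)` loop of A; state = (errors, defined, referenced, types, current, braces)
def pvA_loop :
    List String → Nat →
    (List String × PySem.Set String × PySem.Set String × PySem.Dict String String × Option String × Int) →
    (List String × PySem.Set String × PySem.Set String × PySem.Dict String String × Option String × Int)
  | [], _, st => st
  | raw :: rest, i, (errors, defined, referenced, types, cur, braces) =>
    let line := PySem.Str.strip raw
    let braces := braces + ((PySem.Str.count line "{" : Int) - (PySem.Str.count line "}" : Int))
    let (errors, defined, types, cur) :=
      if PySem.Str.startswith line "node" then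
        let parts := PySem.Str.split₀ line
        if 3 ≤ parts.length then
          -- parts[1], parts[2] are in range by the length guard
          let node_type := parts.getD 1 ""
          let node_name := pvRstripBrace (parts.getD 2 "")
          (errors, PySem.Set.add defined node_name, types.insert node_name node_type, some node_name)
        else
          (errors ++ ["Line " ++ PySem.Int.toStr ((i : Int) + 1) ++ ": Invalid node definition"],
           defined, types, cur)
      else (errors, defined, types, cur)
    let referenced := pvA_refs cur line referenced
    pvA_loop rest (i + 1) (errors, defined, referenced, types, cur, braces)


def validate_gmn_structure_py (gmn_spec : String) : List String :=
  -- .split("\n"): separator non-empty, split? never returns none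
  let lines := (PySem.Str.split? (PySem.Str.strip gmn_spec) "\n").getD []
  match pvA_loop lines 0 ([], [], [], PySem.Dict.empty, none, 0) with
  | (errors, defined, referenced, types, _cur, braces) =>
    let errors :=
      if braces ≠ 0 then
        errors ++ ["Unbalanced braces: " ++ PySem.Int.toStr braces ++ " unclosed"]
      else errors
    let undefined_refs := PySem.Set.diff referenced defined
    let errors :=
      if undefined_refs ≠ [] then
        errors ++ ["Undefined node references: " ++
          PySem.Str.join ", " (PySem.List.sorted undefined_refs id)]
      else errors
    let found := PySem.Set.ofList types.values
    let missing := PySem.Set.diff (PySem.Set.ofList ["state", "action"]) found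
    let errors :=
      if missing ≠ [] then
        errors ++ ["Missing required node types: " ++
          PySem.Str.join ", " (PySem.List.sorted missing id)]
      else errors
    if !(found.contains "transition") && !(found.contains "emission") then
      errors ++ ["No transition or emission nodes defined"]
    else errors

-- ===== PORT B =====

def pvB_parseDef (line : String) : Option (String × String) :=
  if PySem.Str.startswith line "node" then
    let parts := PySem.Str.split₀ line
    if 3 ≤ parts.length then some (parts.getD 1 "", pvRstripBrace (parts.getD 2 "")) else none
  else none

def pvB_extractRefs (line : String) : List String :=
  let value := PySem.Str.strip (((PySem.Str.splitMax? line ":" 1).getD []).getD 1 "")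
  if PySem.Str.startswith value "[" then
    let items := ((PySem.Str.split? (PySem.Str.stripChars value "[]") ",").getD []).map PySem.Str.strip
    items.filter (fun r => !(r.toList.isEmpty) && !(PySem.Str.strIsdigit r))
  else if !(value.toList.isEmpty) && !(PySem.Str.strIsdigit value) && value != "true" && value != "false" then
    [value]
  else []

-- the "Invalid node definition" comprehension (with its enumerate counter)
def pvB_invalid : Nat → List (String × Option (String × String)) → List String
  | _, [] => []
  | i, ld :: rest =>
    if PySem.Str.startswith ld.1 "node" && ld.2.isNone then
      ("Line " ++ PySem.Int.toStr ((i : Int) + 1) ++ ": Invalid node definition") :: pvB_invalid (i + 1) rest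
    else pvB_invalid (i + 1) rest

def pvB_insertDef (d : PySem.Dict String String) (o : Option (String × String)) :
    PySem.Dict String String :=
  match o with
  | some p => d.insert p.2 p.1
  | none => d

-- gate scan: truthiness of the current node name after each line
def pvB_gates : Bool → List (Option (String × String)) → List Bool
  | _, [] => []
  | g, d :: rest =>
    let g' := match d with
      | some p => !(p.2.toList.isEmpty)
      | none => g
    g' :: pvB_gates g' rest

def pvB_refStep (refs : PySem.Set String) (lg : String × Bool) : PySem.Set String :=
  if lg.2 && PySem.Str.isIn ":" lg.1 &&
      (PySem.Str.isIn "from:" lg.1 || PySem.Str.isIn "to:" lg.1 || PySem.Str.isIn "state:" lg.1) then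
    PySem.Set.update refs (pvB_extractRefs lg.1)
  else refs

def validate_gmn_structure_py_alt (gmn_spec : String) : List String :=
  let lines := ((PySem.Str.split? (PySem.Str.strip gmn_spec) "\n").getD []).map PySem.Str.strip
  let defs := lines.map pvB_parseDef
  let brace_count : Int :=
    (lines.map (fun l => (PySem.Str.count l "{" : Int) - (PySem.Str.count l "}" : Int))).sum
  let errors := pvB_invalid 0 (lines.zip defs)
  let node_types := defs.foldl pvB_insertDef PySem.Dict.empty
  let gates := pvB_gates false defs
  let referenced := (lines.zip gates).foldl pvB_refStep []
  let undefined := referenced.filter (fun r => !(node_types.contains r))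
  let found := PySem.Set.ofList node_types.values
  let missing := (["action", "state"] : List String).filter (fun t => !(found.contains t))
  let errors :=
    if brace_count ≠ 0 then
      errors ++ ["Unbalanced braces: " ++ PySem.Int.toStr brace_count ++ " unclosed"]
    else errors
  let errors :=
    if undefined ≠ [] then
      errors ++ ["Undefined node references: " ++
        PySem.Str.join ", " (PySem.List.sorted undefined id)]
    else errors
  let errors :=
    if missing ≠ [] then
      errors ++ ["Missing required node types: " ++ PySem.Str.join ", " missing]
    else errors
  if !(found.contains "transition") && !(found.contains "emission") then
    errors ++ ["No transition or emission nodes defined"]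
  else errors

-- ===== PRECONDITION & SPEC =====
def Spec_validate_gmn_structure_py (gmn_spec : String) (out : List String) : Prop := out = validate_gmn_structure_py_alt gmn_spec
instance (gmn_spec : String) (out : List String) : Decidable (Spec_validate_gmn_structure_py gmn_spec out) := by unfold Spec_validate_gmn_structure_py; infer_instance

-- ===== CLAIM (what is proved, stated in full; the proofs are below) =====
def Claim_equal_validate_gmn_structure_py : Prop := ∀ (gmn_spec : String), Dom_validate_gmn_structure_py gmn_spec → Spec_validate_gmn_structure_py gmn_spec (validate_gmn_structure_py gmn_spec)

-- ===== LEMMAS AND PROOFS =====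

theorem pv_strip_strip (s : String) :
    PySem.Str.strip (PySem.Str.strip s) = PySem.Str.strip s := by
  have chars : ∀ t : List Char, PySem.Chars.strip (PySem.Chars.strip t) = PySem.Chars.strip t := by
    intro t
    simp only [PySem.Chars.strip]
    have key : ∀ u : List Char, PySem.Chars.lstrip (PySem.Chars.rstrip (PySem.Chars.lstrip u)) = PySem.Chars.rstrip (PySem.Chars.lstrip u) := by
      intro u
      simp only [PySem.Chars.lstrip, PySem.Chars.rstrip]
      have hpre : ((u.dropWhile PySem.Chars.isspace).reverse.dropWhile PySem.Chars.isspace).reverse <+: u.dropWhile PySem.Chars.isspace := by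
        rw [← List.reverse_suffix]
        simpa using List.dropWhile_suffix (l := (u.dropWhile PySem.Chars.isspace).reverse) (p := PySem.Chars.isspace)
      rcases hpre with ⟨v, hv⟩
      cases hh : ((u.dropWhile PySem.Chars.isspace).reverse.dropWhile PySem.Chars.isspace).reverse with
      | nil => simp
      | cons c cs =>
        rw [List.dropWhile_cons]
        have hhead : (u.dropWhile PySem.Chars.isspace).head? = some c := by
          rw [← hv, hh]; simp
        have hnot := List.head?_dropWhile_not PySem.Chars.isspace u
        rw [hhead] at hnot
        simp [hnot]
    rw [key]
    simp only [PySem.Chars.rstrip, List.reverse_reverse, List.dropWhile_idempotent]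
  simp only [PySem.Str.strip]
  rw [show (String.ofList (PySem.Chars.strip s.toList)).toList = PySem.Chars.strip s.toList from by simp, chars]

theorem pv_contains_keys (d : PySem.Dict String String) (k : String) :
    PySem.Set.contains d.keys k = d.contains k := by
  obtain ⟨items⟩ := d
  induction items with
  | nil => rfl
  | cons p rest ih =>
    simp only [PySem.Set.contains, PySem.Dict.keys, PySem.Dict.contains, List.map_cons,
      List.contains_cons, List.any_cons] at *
    rw [← ih]
    cases h : (k == p.1) <;> cases h2 : (p.1 == k) <;> simp_all [BEq.comm]

-- inserting into the dict extends its key list exactly like set.add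

theorem pv_keys_insert (d : PySem.Dict String String) (k v : String) :
    (d.insert k v).keys = PySem.Set.add d.keys k := by
  simp only [PySem.Dict.insert, PySem.Set.add, pv_contains_keys]
  cases h : d.contains k with
  | false => rw [if_neg (by simp), if_neg (by simp)]; simp [PySem.Dict.keys]
  | true =>
    rw [if_pos (by simp), if_pos (by simp)]
    simp only [PySem.Dict.keys, List.map_map]
    apply List.map_congr_left
    intro p _
    by_cases hp : p.1 = k <;> simp [hp]

-- A's conditional-add loop over the split items is set-update of the filtered, stripped items

theorem pv_addList_eq (items : List String) (refs : PySem.Set String) :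
    pvA_addList refs items
    = PySem.Set.update refs
        ((items.map PySem.Str.strip).filter (fun r => !(r.toList.isEmpty) && !(PySem.Str.strIsdigit r))) := by
  unfold pvA_addList
  induction items generalizing refs with
  | nil => rfl
  | cons x rest ih =>
    rw [List.foldl_cons, List.map_cons, List.filter_cons]
    cases h : (!(PySem.Str.strip x).toList.isEmpty && !PySem.Str.strIsdigit (PySem.Str.strip x)) with
    | false =>
      rw [if_neg (by rw [h]; simp)]
      show _ = PySem.Set.update refs _
      rw [ih]
      simp
    | true =>
      rw [if_pos (by rw [h])]
      show List.foldl _ (PySem.Set.add refs (PySem.Str.strip x)) rest = _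
      rw [ih]
      rfl

theorem pv_refs_line (cur : Option String) (line : String) (refs : PySem.Set String) :
    pvA_refs cur line refs = pvB_refStep refs (line, pvA_truthy cur) := by
  unfold pvA_refs pvB_refStep
  cases hg : pvA_truthy cur
  · simp
  · cases hc : PySem.Str.isIn ":" line
    · simp
    · cases ho : (PySem.Str.isIn "from:" line || PySem.Str.isIn "to:" line || PySem.Str.isIn "state:" line)
      · simp
      · simp only [Bool.true_and, if_true, pvB_extractRefs]
        set V := PySem.Str.strip (((PySem.Str.splitMax? line ":" 1).getD []).getD 1 "") with hV
        have hVV : PySem.Str.strip V = V := by rw [hV, pv_strip_strip]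
        by_cases hb : PySem.Str.startswith V "[" = true
        · simp only [hb, if_true, pv_addList_eq]
        · simp only [hb, if_false, Bool.false_eq_true, hVV]
          by_cases hcond : (!(V.toList.isEmpty) && !(PySem.Str.strIsdigit V) && V != "true" && V != "false") = true
          · simp only [hcond, if_true]
            rfl
          · simp only [hcond, if_false, Bool.false_eq_true]
            rfl

-- proof-layer description of A's current_node after a list of parsed lines
def pvLastCur (cur : Option String) (ds : List (Option (String × String))) : Option String :=
  ds.foldl (fun c d => match d with | some p => some p.2 | none => c) cur

theorem pv_loop_eq (ls : List String) : ∀ (i : Nat) (e : List String)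
    (rf : PySem.Set String) (ty : PySem.Dict String String) (cur : Option String) (br : Int),
    pvA_loop ls i (e, ty.keys, rf, ty, cur, br) =
      (e ++ pvB_invalid i ((ls.map PySem.Str.strip).zip ((ls.map PySem.Str.strip).map pvB_parseDef)),
       (((ls.map PySem.Str.strip).map pvB_parseDef).foldl pvB_insertDef ty).keys,
       ((ls.map PySem.Str.strip).zip (pvB_gates (pvA_truthy cur) ((ls.map PySem.Str.strip).map pvB_parseDef))).foldl pvB_refStep rf,
       ((ls.map PySem.Str.strip).map pvB_parseDef).foldl pvB_insertDef ty,
       pvLastCur cur ((ls.map PySem.Str.strip).map pvB_parseDef),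
       br + ((ls.map PySem.Str.strip).map (fun l => ((PySem.Str.count l "{" : Int) - (PySem.Str.count l "}" : Int)))).sum) := by
  induction ls with
  | nil =>
    intro i e rf ty cur br
    show _ = (e ++ [], ty.keys, rf, ty, cur, br + ([] : List Int).sum)
    simp [pvA_loop]
  | cons raw rest ih =>
    intro i e rf ty cur br
    rw [pvA_loop]
    simp only [List.map_cons, List.zip_cons_cons, List.foldl_cons, List.sum_cons]
    by_cases h1 : PySem.Str.startswith (PySem.Str.strip raw) "node" = true
    · by_cases h2 : 3 ≤ (PySem.Str.split₀ (PySem.Str.strip raw)).length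
      · -- valid node definition
        have hd : pvB_parseDef (PySem.Str.strip raw) =
            some ((PySem.Str.split₀ (PySem.Str.strip raw)).getD 1 "",
                  pvRstripBrace ((PySem.Str.split₀ (PySem.Str.strip raw)).getD 2 "")) := by
          unfold pvB_parseDef; rw [if_pos h1, if_pos h2]
        simp only [h1, h2, if_true, hd]
        rw [pv_refs_line,
          show PySem.Set.add ty.keys (pvRstripBrace ((PySem.Str.split₀ (PySem.Str.strip raw)).getD 2 "")) =
            (ty.insert (pvRstripBrace ((PySem.Str.split₀ (PySem.Str.strip raw)).getD 2 ""))
              ((PySem.Str.split₀ (PySem.Str.strip raw)).getD 1 "")).keys from (pv_keys_insert _ _ _).symm,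
          ih]
        simp [pvB_invalid, pvB_gates, pvB_insertDef, pvLastCur, pvA_truthy, add_assoc]
      · -- invalid node definition: an error is appended, nothing else changes
        have hd : pvB_parseDef (PySem.Str.strip raw) = none := by
          unfold pvB_parseDef; rw [if_pos h1, if_neg h2]
        simp only [h1, h2, if_true, if_false, hd]
        rw [pv_refs_line, ih]
        have h1c : PySem.Chars.startswith (PySem.Chars.strip raw.toList) (['n', 'o', 'd', 'e'] : List Char) = true := by
          simpa using h1
        simp [pvB_invalid, pvB_gates, pvB_insertDef, pvLastCur, h1c, add_assoc]
    · -- not a node-definition line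
      have hd : pvB_parseDef (PySem.Str.strip raw) = none := by
        unfold pvB_parseDef; rw [if_neg h1]
      have h1b : PySem.Str.startswith (PySem.Str.strip raw) "node" = false := by
        simpa using h1
      simp only [h1b, Bool.false_eq_true, if_false, hd]
      rw [pv_refs_line, ih]
      have h1c : PySem.Chars.startswith (PySem.Chars.strip raw.toList) (['n', 'o', 'd', 'e'] : List Char) = false := by
        simpa using h1b
      simp [pvB_invalid, pvB_gates, pvB_insertDef, pvLastCur, h1c, add_assoc]

theorem pv_missing (found : PySem.Set String) :
    PySem.List.sorted (PySem.Set.diff (PySem.Set.ofList ["state", "action"]) found) id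
      = (["action", "state"] : List String).filter (fun t => !(found.contains t)) := by
  unfold PySem.Set.diff
  rw [show PySem.Set.ofList (["state", "action"] : List String) = ["state", "action"] from rfl]
  cases hs : found.contains "state" <;> cases ha : found.contains "action" <;>
    simp only [List.filter, hs, ha, Bool.not_true, Bool.not_false]
  · apply PySem.List.sorted_eq_of_perm_of_pairwise_lt
    · exact List.Perm.swap _ _ _
    · simp [List.pairwise_cons]; decide
  · rfl
  · rfl
  · rfl

theorem pv_diff_eq (R : PySem.Set String) (D : PySem.Dict String String) :
    PySem.Set.diff R D.keys = R.filter (fun r => !(D.contains r)) := by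
  unfold PySem.Set.diff
  apply List.filter_congr
  intro x _
  rw [← pv_contains_keys]

theorem pv_missing_block (found : PySem.Set String) (errors : List String) :
    (if PySem.Set.diff (PySem.Set.ofList ["state", "action"]) found ≠ [] then
       errors ++ ["Missing required node types: " ++
         PySem.Str.join ", " (PySem.List.sorted (PySem.Set.diff (PySem.Set.ofList ["state", "action"]) found) id)]
     else errors)
    = (if (["action", "state"] : List String).filter (fun t => !(found.contains t)) ≠ [] then
         errors ++ ["Missing required node types: " ++
           PySem.Str.join ", " ((["action", "state"] : List String).filter (fun t => !(found.contains t)))]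
       else errors) := by
  rw [show PySem.List.sorted (PySem.Set.diff (PySem.Set.ofList ["state", "action"]) found) id
        = (["action", "state"] : List String).filter (fun t => !(found.contains t)) from pv_missing found]
  unfold PySem.Set.diff
  rw [show PySem.Set.ofList (["state", "action"] : List String) = ["state", "action"] from rfl]
  cases hs : found.contains "state" <;> cases ha : found.contains "action" <;>
    simp_all [List.filter]

theorem pv_assemble (E : List String) (RF : PySem.Set String) (TY : PySem.Dict String String) (BR : Int) :
    (let errors := if BR ≠ 0 then E ++ ["Unbalanced braces: " ++ PySem.Int.toStr BR ++ " unclosed"] else E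
     let undefined_refs := PySem.Set.diff RF TY.keys
     let errors := if undefined_refs ≠ [] then
         errors ++ ["Undefined node references: " ++ PySem.Str.join ", " (PySem.List.sorted undefined_refs id)]
       else errors
     let found := PySem.Set.ofList TY.values
     let missing := PySem.Set.diff (PySem.Set.ofList ["state", "action"]) found
     let errors := if missing ≠ [] then
         errors ++ ["Missing required node types: " ++ PySem.Str.join ", " (PySem.List.sorted missing id)]
       else errors
     if !(found.contains "transition") && !(found.contains "emission") then
       errors ++ ["No transition or emission nodes defined"]
     else errors)
    = (let undefined := RF.filter (fun r => !(TY.contains r))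
       let found := PySem.Set.ofList TY.values
       let missing := (["action", "state"] : List String).filter (fun t => !(found.contains t))
       let errors := if BR ≠ 0 then E ++ ["Unbalanced braces: " ++ PySem.Int.toStr BR ++ " unclosed"] else E
       let errors := if undefined ≠ [] then
           errors ++ ["Undefined node references: " ++ PySem.Str.join ", " (PySem.List.sorted undefined id)]
         else errors
       let errors := if missing ≠ [] then
           errors ++ ["Missing required node types: " ++ PySem.Str.join ", " missing]
         else errors
       if !(found.contains "transition") && !(found.contains "emission") then
         errors ++ ["No transition or emission nodes defined"]
       else errors) := by
  simp only [pv_diff_eq, pv_missing_block]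

theorem pv_ports_eq (s : String) :
    validate_gmn_structure_py s = validate_gmn_structure_py_alt s := by
  unfold validate_gmn_structure_py validate_gmn_structure_py_alt
  have h0 := pv_loop_eq ((PySem.Str.split? (PySem.Str.strip s) "\n").getD []) 0 [] [] PySem.Dict.empty none 0
  rw [show (PySem.Dict.empty : PySem.Dict String String).keys = [] from rfl,
      show pvA_truthy none = false from rfl] at h0
  simp only [h0, zero_add, List.nil_append]
  exact pv_assemble _ _ _ _

-- ===== VERDICT (by name: the statement is the Claim_ definition above) =====
theorem validate_gmn_structure_py_spec : Claim_equal_validate_gmn_structure_py := by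
  intro gmn_spec _dom
  unfold Spec_validate_gmn_structure_py
  exact pv_ports_eq gmn_spec
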